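-- pv_equiv track=rewrite | github.com/YasirAhmed2/IS-LAB | reciprocal_Cipher.py | reciprocal_cipher
-- ===== SOURCE A (Python) =====
-- def reciprocal_cipher(text):
--     text=text.upper()
--     result=""
--     for char in text:
--         if 'A'<=char<='Z':
--             cipher_text=chr(155-ord(char))
--             result+=cipher_text
--         else:
--             result+=char
--     return result
-- ===== SOURCE B (Python) =====
-- _ALPHABET = 'ABCDEFGHIJKLMNOPQRSTUVWXYZ'
-- _TABLE = str.maketrans(_ALPHABET, _ALPHABET[::-1])
--
--
-- def reciprocal_cipher(text):
--     return text.upper().translate(_TABLE)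
-- ===== Notes on version B (the rewrite author's own statement) =====
-- stated objective: idiomatic
-- what changed: B precomputes a fixed translation table (alphabet mapped onto its reverse) once via str.maketrans and applies it with a single translate call on the uppercased text, replacing A's per-character branch-and-concatenate loop.
import Mathlib
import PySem

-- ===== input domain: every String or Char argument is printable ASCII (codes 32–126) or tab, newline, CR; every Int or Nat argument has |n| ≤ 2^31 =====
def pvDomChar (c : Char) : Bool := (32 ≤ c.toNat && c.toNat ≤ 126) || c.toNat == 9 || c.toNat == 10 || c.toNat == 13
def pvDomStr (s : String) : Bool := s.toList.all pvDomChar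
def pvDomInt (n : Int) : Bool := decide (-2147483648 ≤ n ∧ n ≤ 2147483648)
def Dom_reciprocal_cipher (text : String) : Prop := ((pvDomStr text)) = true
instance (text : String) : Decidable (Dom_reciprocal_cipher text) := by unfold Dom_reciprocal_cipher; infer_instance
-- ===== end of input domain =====

-- B replaces A's per-character branch-and-concatenate loop with a translation table
-- (alphabet zipped with its reverse) built once and applied in a single mapping pass (idiomatic).

-- ===== PORT A =====
def reciprocal_cipher (text : String) : String :=
  -- text = text.upper()
  let text := PySem.Str.upper text
  -- result = ""; for char in text: …  — foldl over the characters, appending one char per step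
  String.ofList (text.toList.foldl (fun result char =>
    if 'A' ≤ char ∧ char ≤ 'Z' then
      -- cipher_text = chr(155 - ord(char)); result += cipher_text
      result ++ [Char.ofNat (155 - char.toNat)]
    else
      result ++ [char]) [])

-- ===== PORT B =====
-- _TABLE = str.maketrans(_ALPHABET, _ALPHABET[::-1]) : an association table letter ↦ reversed letter
def pvAlphabet : List Char := "ABCDEFGHIJKLMNOPQRSTUVWXYZ".toList
def pvTable : List (Char × Char) := pvAlphabet.zip pvAlphabet.reverse
-- text.upper().translate(_TABLE): per character, the table entry if present, else the character itself
-- (exact port of str.translate with a maketrans char→char table)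
def reciprocal_cipher_alt (text : String) : String :=
  String.ofList ((PySem.Str.upper text).toList.map (fun c => (pvTable.lookup c).getD c))

-- ===== PRECONDITION & SPEC =====
def Spec_reciprocal_cipher (text : String) (out : String) : Prop := out = reciprocal_cipher_alt text
instance (text : String) (out : String) : Decidable (Spec_reciprocal_cipher text out) := by unfold Spec_reciprocal_cipher; infer_instance

-- ===== CLAIM (what is proved, stated in full; the proofs are below) =====
def Claim_equal_reciprocal_cipher : Prop := ∀ (text : String), Dom_reciprocal_cipher text → Spec_reciprocal_cipher text (reciprocal_cipher text)

-- ===== LEMMAS AND PROOFS =====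

-- A's step and B's step agree on every ASCII character (checked exhaustively on codes < 128)
set_option maxRecDepth 8192 in
theorem pvStep_eq_nat : ∀ n, n < 128 →
    (let c := PySem.Chars.upperChar (Char.ofNat n);
      (if 'A' ≤ c ∧ c ≤ 'Z' then Char.ofNat (155 - c.toNat) else c) = (pvTable.lookup c).getD c) := by
  decide

theorem pvStep_eq (c : Char) (h : pvDomChar c = true) :
    (let u := PySem.Chars.upperChar c;
      (if 'A' ≤ u ∧ u ≤ 'Z' then Char.ofNat (155 - u.toNat) else u) = (pvTable.lookup u).getD u) := by
  have hlt : c.toNat < 128 := by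
    simp only [pvDomChar, Bool.or_eq_true, Bool.and_eq_true, decide_eq_true_eq, beq_iff_eq] at h
    omega
  have := pvStep_eq_nat c.toNat hlt
  rwa [Char.ofNat_toNat] at this

theorem reciprocal_cipher_spec : Claim_equal_reciprocal_cipher := by
  intro text hdom
  unfold Spec_reciprocal_cipher reciprocal_cipher reciprocal_cipher_alt
  have hfold : ((PySem.Str.upper text).toList.foldl (fun result char =>
      if 'A' ≤ char ∧ char ≤ 'Z' then result ++ [Char.ofNat (155 - char.toNat)]
      else result ++ [char]) [])
      = (PySem.Str.upper text).toList.map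
          (fun char => if 'A' ≤ char ∧ char ≤ 'Z' then Char.ofNat (155 - char.toNat) else char) := by
    have : (fun (result : List Char) (char : Char) =>
        if 'A' ≤ char ∧ char ≤ 'Z' then result ++ [Char.ofNat (155 - char.toNat)]
        else result ++ [char])
        = (fun result char => result ++
            [if 'A' ≤ char ∧ char ≤ 'Z' then Char.ofNat (155 - char.toNat) else char]) := by
      funext r c; split <;> rfl
    rw [this, PySem.List.foldl_append_singleton_eq_map]
    simp
  show String.ofList ((PySem.Str.upper text).toList.foldl (fun result char =>
      if 'A' ≤ char ∧ char ≤ 'Z' then result ++ [Char.ofNat (155 - char.toNat)]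
      else result ++ [char]) [])
    = String.ofList ((PySem.Str.upper text).toList.map (fun c => (pvTable.lookup c).getD c))
  rw [hfold]
  congr 1
  have hl : (PySem.Str.upper text).toList = text.toList.map PySem.Chars.upperChar := by
    simp [PySem.Str.toList_upper, PySem.Chars.upper]
  rw [hl, List.map_map, List.map_map]
  apply List.map_congr_left
  intro c hc
  have hdc : pvDomChar c = true := by
    have := hdom
    unfold Dom_reciprocal_cipher pvDomStr at this
    exact List.all_eq_true.mp this c hc
  exact pvStep_eq c hdc
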